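-- pv_equiv track=rewrite | github.com/4ON91/MathNotes_and_3D-related-scripts | Linux/Python/TextChanger/VerticalText_dic.py | RT3
-- ===== SOURCE A (Python) =====
-- def RT3(text):
--     text = text.lower()
--
--     #a = list("ⒶⒷⒸⒹⒺⒻⒼⒽⒾⒿⓀⓁⓂⓃⓄⓅⓆⓇⓈⓉⓊⓋⓌⓍⓎⓏ")
--     a = list("abcdefghijklmnopqrstuvwxyz")
--     b = list("⒜⒝⒞⒟⒠⒡⒢⒣⒤⒥⒦⒧⒨⒩⒪⒫⒬⒭⒮⒯⒰⒱⒲⒳⒴⒵")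
--     dic = dict(zip(a,b))
--
--     #for x in range(0, len(b)):
--         #dic[b[x]] = a[x]
--
--     a = [text]
--     b = []
--     for line in a:
--         b.append(line.split(" "))
--     highest = 0
--     for x in range(0,len(b)):
--         for y in range(0,len(b[x])):
--             if len(b[x][y]) > highest: highest = len(b[x][y])
--     newtext = "\r"
--     for o in range(0, highest):
--         for x in range(0,len(b)):
--             for y in range(0,len(b[x])):
--                 try:
--                     newtext += b[0][y][o]+""
--                 except IndexError:
--                     newtext += ("ⓧ")
--             newtext+="\n\r"
--
--     for r1, r2 in dic.items():
--         newtext = newtext.replace(r1, r2)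
--     return newtext
-- ===== SOURCE B (Python) =====
-- def RT3(text):
--     # Transpose-based rewrite: split once, pad every word to the common width
--     # with 'x' (U+24E7), transpose with zip, and map letters at the end.
--     words = text.lower().split(" ")
--     width = max(map(len, words), default=0)
--     padded = [w.ljust(width, "\u24e7") for w in words]
--     out = "\r" + "".join("".join(col) + "\n\r" for col in zip(*padded))
--     for r1, r2 in zip("abcdefghijklmnopqrstuvwxyz",
--                       "\u249c\u249d\u249e\u249f\u24a0\u24a1\u24a2\u24a3\u24a4\u24a5\u24a6\u24a7\u24a8\u24a9\u24aa\u24ab\u24ac\u24ad\u24ae\u24af\u24b0\u24b1\u24b2\u24b3\u24b4\u24b5"):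
--         out = out.replace(r1, r2)
--     return out
-- ===== Notes on version B (the rewrite author's own statement) =====
-- stated objective: simpler
-- what changed: Replaces A's separate max-length scan and the per-character index-with-try/except emission loops by a single pad-to-common-width + zip transpose that joins each output column at once (per-column joins instead of per-character exception-handled concatenation).
import Mathlib
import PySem

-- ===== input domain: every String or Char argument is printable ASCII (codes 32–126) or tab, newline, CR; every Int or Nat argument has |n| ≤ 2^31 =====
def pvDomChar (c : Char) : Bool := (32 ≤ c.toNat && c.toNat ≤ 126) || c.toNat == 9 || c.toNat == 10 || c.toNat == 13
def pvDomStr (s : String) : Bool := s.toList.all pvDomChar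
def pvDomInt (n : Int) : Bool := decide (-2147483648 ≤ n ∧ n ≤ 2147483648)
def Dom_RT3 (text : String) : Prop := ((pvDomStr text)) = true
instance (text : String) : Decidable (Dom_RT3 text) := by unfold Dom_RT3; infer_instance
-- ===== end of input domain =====

-- B replaces A's max-length scan and index-with-try/except emission by pad-to-width + transpose (zip of padded words); objective: simpler decomposition.

-- ===== PORT A =====
-- literal transliteration of A: lower, split, explicit highest scan, nested index loops with
-- the try/except ported as `getElem?` (none = IndexError), then the chain of 26 replaces.
def RT3 (text : String) : String :=
  let t := PySem.Chars.lower text.toList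
  let a := "abcdefghijklmnopqrstuvwxyz".toList
  let b := "⒜⒝⒞⒟⒠⒡⒢⒣⒤⒥⒦⒧⒨⒩⒪⒫⒬⒭⒮⒯⒰⒱⒲⒳⒴⒵".toList
  let dic := a.zip b          -- dict(zip(a,b)) as an association list in insertion order
  let a2 := [t]
  let b2 := a2.foldl (fun acc line => acc ++ [PySem.Chars.splitOn line [' ']]) []
  let highest := (List.range b2.length).foldl (fun h x =>
      (List.range (b2.getD x []).length).foldl (fun h y =>
        if ((b2.getD x []).getD y []).length > h then ((b2.getD x []).getD y []).length else h) h) 0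
  let newtext := (List.range highest).foldl (fun nt o =>
      (List.range b2.length).foldl (fun nt x =>
        ((List.range (b2.getD x []).length).foldl (fun nt y =>
          match ((b2.getD 0 []).getD y [])[o]? with   -- try b[0][y][o] / except IndexError
          | some c => nt ++ [c]
          | none => nt ++ ['ⓧ']) nt) ++ ['\n', '\r']) nt) ['\r']
  let final := dic.foldl (fun s p => PySem.Chars.replace s [p.1] [p.2]) newtext
  String.ofList final

-- ===== PORT B =====
-- termination measure for zipStar (used by its decreasing_by)
theorem pvTailsSum_le (ls : List (List Char)) :
    (((ls.map List.tail).map List.length).sum) ≤ ((ls.map List.length).sum) := by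
  induction ls with
  | nil => simp
  | cons l ls ih =>
      simp only [List.map_cons, List.sum_cons]
      have : l.tail.length ≤ l.length := by cases l <;> simp
      omega

theorem pvTailsSum_lt (ls : List (List Char)) (h1 : ls ≠ []) (h2 : ∀ l ∈ ls, l ≠ []) :
    (((ls.map List.tail).map List.length).sum) < ((ls.map List.length).sum) := by
  cases ls with
  | nil => exact absurd rfl h1
  | cons l ls =>
      simp only [List.map_cons, List.sum_cons]
      have hl : l ≠ [] := h2 l (List.mem_cons_self ..)
      have : l.tail.length < l.length := by cases l with
        | nil => exact absurd rfl hl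
        | cons c cs => simp
      have := pvTailsSum_le ls
      omega

-- port of Python's zip(*padded): emit the tuple of heads while every list is nonempty
def zipStar (ls : List (List Char)) : List (List Char) :=
  if h : ls ≠ [] ∧ ∀ l ∈ ls, l ≠ [] then
    ls.map (fun l => l.headD 'ⓧ') :: zipStar (ls.map List.tail)
  else []
termination_by (ls.map List.length).sum
decreasing_by simpa using pvTailsSum_lt ls h.1 h.2

-- literal transliteration of B (Source B): split once, pad each word to the common width, transpose, join
def RT3_alt (text : String) : String :=
  let words := PySem.Chars.splitOn (PySem.Chars.lower text.toList) [' ']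
  let width := PySem.List.maxD (words.map List.length) id 0
  let padded := words.map (fun w => w ++ List.replicate (width - w.length) 'ⓧ')
  let out := '\r' :: List.flatten ((zipStar padded).map (fun col => col ++ ['\n', '\r']))
  let final := ("abcdefghijklmnopqrstuvwxyz".toList.zip
      "⒜⒝⒞⒟⒠⒡⒢⒣⒤⒥⒦⒧⒨⒩⒪⒫⒬⒭⒮⒯⒰⒱⒲⒳⒴⒵".toList).foldl
      (fun s p => PySem.Chars.replace s [p.1] [p.2]) out
  String.ofList final

-- ===== PRECONDITION & SPEC =====
def Spec_RT3 (text : String) (out : String) : Prop := out = RT3_alt text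
instance (text : String) (out : String) : Decidable (Spec_RT3 text out) := by unfold Spec_RT3; infer_instance

-- ===== CLAIM (what is proved, stated in full; the proofs are below) =====
def Claim_equal_RT3 : Prop := ∀ (text : String), Dom_RT3 text → Spec_RT3 text (RT3 text)

-- ===== LEMMAS AND PROOFS =====

-- max? on a nonempty Nat list is foldl max from its head
theorem pvMax?_eq : ∀ (ls : List Nat) (x : Nat),
    PySem.List.max? (x :: ls) id = some (ls.foldl max x) := by
  intro ls
  induction ls with
  | nil => intro x; rfl
  | cons y ls ih =>
      intro x
      simp only [PySem.List.max?, List.foldl_cons] at ih ⊢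
      have : (if id x < id y then some y else some x) = some (max x y) := by
        simp only [id_eq]
        by_cases h : x < y
        · rw [if_pos h, Nat.max_eq_right (by omega)]
        · rw [if_neg h, Nat.max_eq_left (by omega)]
      rw [this, ih]

theorem pvMaxD_eq_foldl (ls : List Nat) :
    PySem.List.maxD ls id 0 = ls.foldl max 0 := by
  cases ls with
  | nil => rfl
  | cons x ls =>
      simp only [PySem.List.maxD, pvMax?_eq, Option.getD_some, List.foldl_cons]
      rw [Nat.max_eq_right (by omega)]

-- A's "highest" scan over one line equals foldl max over the word lengths
theorem pvHighest_eq (ws : List (List Char)) : ∀ (h0 : Nat),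
    (List.range ws.length).foldl (fun h y =>
        if (ws.getD y []).length > h then (ws.getD y []).length else h) h0
      = (ws.map List.length).foldl max h0 := by
  induction ws with
  | nil => intro h0; rfl
  | cons w ws ih =>
      intro h0
      simp only [List.length_cons, List.range_succ_eq_map, List.foldl_cons, List.foldl_map,
        List.getD_cons_zero, List.getD_cons_succ, List.map_cons]
      rw [ih]
      have : (if w.length > h0 then w.length else h0) = max h0 w.length := by
        split <;> omega
      rw [this, List.foldl_map]

-- getD through the 'ⓧ'-padding is getD with default 'ⓧ'
theorem pvPad_getD (w : List Char) (k o : Nat) :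
    (w ++ List.replicate k 'ⓧ').getD o 'ⓧ' = w.getD o 'ⓧ' := by
  rw [List.getD_eq_getElem?_getD, List.getD_eq_getElem?_getD]
  by_cases h : o < w.length
  · rw [List.getElem?_append_left h]
  · rw [List.getElem?_append_right (by omega), List.getElem?_eq_none (l := w) (by omega)]
    simp only [List.getElem?_replicate]
    split <;> rfl

-- zipStar on a nonempty family of equal-length lists is the index transpose
theorem pvZipStar_eq : ∀ (n : Nat) (ls : List (List Char)), ls ≠ [] →
    (∀ l ∈ ls, l.length = n) →
    zipStar ls = (List.range n).map (fun o => ls.map (fun l => l.getD o 'ⓧ')) := by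
  intro n
  induction n with
  | zero =>
      intro ls h1 h2
      rw [zipStar]
      have : ¬ (ls ≠ [] ∧ ∀ l ∈ ls, l ≠ []) := by
        rintro ⟨-, h⟩
        obtain ⟨l, hl⟩ := List.exists_mem_of_ne_nil ls h1
        exact h l hl (List.eq_nil_of_length_eq_zero (h2 l hl))
      simp [this]
  | succ n ih =>
      intro ls h1 h2
      have hne : ∀ l ∈ ls, l ≠ [] := by
        intro l hl h
        have h3 := h2 l hl
        rw [h] at h3
        simp at h3
      rw [zipStar, dif_pos ⟨h1, hne⟩]
      have htail : ∀ l ∈ ls.map List.tail, l.length = n := by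
        intro l hl
        rw [List.mem_map] at hl
        obtain ⟨w, hw, rfl⟩ := hl
        have h3 := h2 w hw
        cases w with
        | nil => exact absurd rfl (hne _ hw)
        | cons c cs => simpa using h3
      rw [ih (ls.map List.tail) (by simpa using h1) htail]
      rw [List.range_succ_eq_map, List.map_cons, List.map_map]
      have hhead : ls.map (fun l => l.headD 'ⓧ') = ls.map (fun l => l.getD 0 'ⓧ') := by
        apply List.map_congr_left
        intro l hl
        cases l with
        | nil => exact absurd rfl (hne _ hl)
        | cons c cs => rfl
      rw [hhead]
      refine congrArg (List.map (fun l => l.getD 0 'ⓧ') ls :: ·) ?_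
      apply List.map_congr_left
      intro o _
      simp only [Function.comp_apply, List.map_map]
      apply List.map_congr_left
      intro l hl
      cases l with
      | nil => exact absurd rfl (hne _ hl)
      | cons c cs => rfl

-- the index-driven row of A equals the map-driven row over the words
theorem pvRow_eq (ws : List (List Char)) (o : Nat) :
    List.flatMap (fun y => match (ws.getD y [])[o]? with
      | some c => [c]
      | none => ['ⓧ']) (List.range ws.length)
      = ws.map (fun w => w.getD o 'ⓧ') := by
  induction ws with
  | nil => rfl
  | cons w ws ih =>
      simp only [List.length_cons, List.range_succ_eq_map, List.flatMap_cons, List.flatMap_map,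
        List.getD_cons_zero, List.getD_cons_succ, List.map_cons]
      rw [show (List.flatMap ((fun y => match (ws.getD y [])[o]? with
        | some c => [c] | none => ['ⓧ']))) (List.range ws.length) = _ from ih]
      rw [List.getD_eq_getElem?_getD]
      cases w[o]? <;> rfl

-- ===== VERDICT (by name: the statement is the Claim_ definition above) =====
theorem RT3_spec : Claim_equal_RT3 := by
  intro text _
  unfold Spec_RT3 RT3 RT3_alt
  dsimp only
  set ws := PySem.Chars.splitOn (PySem.Chars.lower text.toList) [' '] with hws
  rw [show List.foldl (fun acc line => acc ++ [PySem.Chars.splitOn line [' ']]) []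
      [PySem.Chars.lower text.toList] = [ws] from rfl]
  simp only [List.length_cons, List.length_nil, Nat.zero_add, List.range_one,
    List.foldl_cons, List.foldl_nil, List.getD_cons_zero]
  rw [pvHighest_eq ws 0, pvMaxD_eq_foldl]
  set W := (ws.map List.length).foldl max 0 with hW
  clear_value ws W
  congr 2
  -- the pre-replacement bodies agree
  have hrow : ∀ (o : Nat) (nt : List Char),
      List.foldl (fun nt y => match (ws.getD y [])[o]? with
        | some c => nt ++ [c]
        | none => nt ++ ['ⓧ']) nt (List.range ws.length)
      = nt ++ ws.map (fun w => w.getD o 'ⓧ') := by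
    intro o nt
    have hf : (fun (nt : List Char) y => match (ws.getD y [])[o]? with
        | some c => nt ++ [c]
        | none => nt ++ ['ⓧ'])
        = fun nt y => nt ++ (match (ws.getD y [])[o]? with
        | some c => [c]
        | none => ['ⓧ']) := by
      funext nt y
      cases (ws.getD y [])[o]? <;> rfl
    rw [hf, PySem.List.foldl_append_eq_flatMap, pvRow_eq]
  have hstep : (fun (nt : List Char) o =>
      List.foldl (fun nt y => match (ws.getD y [])[o]? with
        | some c => nt ++ [c]
        | none => nt ++ ['ⓧ']) nt (List.range ws.length) ++ ['\n', '\r'])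
      = fun nt o => nt ++ (ws.map (fun w => w.getD o 'ⓧ') ++ ['\n', '\r']) := by
    funext nt o
    rw [hrow o nt, List.append_assoc]
  rw [hstep, PySem.List.foldl_append_eq_flatMap]
  by_cases hnil : ws = []
  · subst hnil
    simp only [List.map_nil, List.foldl_nil] at hW
    subst hW
    rw [zipStar]
    simp
  · have hwsne : ws ≠ [] := hnil
    have hle := (PySem.List.le_foldl_max (ws.map List.length) 0).2
    have hlen : ∀ l ∈ ws.map (fun w => w ++ List.replicate (W - w.length) 'ⓧ'), l.length = W := by
      intro l hl
      rw [List.mem_map] at hl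
      obtain ⟨w, hw, rfl⟩ := hl
      have : w.length ≤ W := hW ▸ hle w.length (List.mem_map.mpr ⟨w, hw, rfl⟩)
      simp only [List.length_append, List.length_replicate]
      omega
    rw [pvZipStar_eq W _ (by simpa using hwsne) hlen]
    have hcol : ∀ o : Nat,
        (ws.map (fun w => w ++ List.replicate (W - w.length) 'ⓧ')).map (fun l => l.getD o 'ⓧ')
        = ws.map (fun w => w.getD o 'ⓧ') := by
      intro o
      rw [List.map_map]
      apply List.map_congr_left
      intro w _
      exact pvPad_getD w _ o
    rw [List.map_map]
    have : ((fun col => col ++ ['\n', '\r']) ∘ fun o =>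
        (ws.map (fun w => w ++ List.replicate (W - w.length) 'ⓧ')).map (fun l => l.getD o 'ⓧ'))
        = fun o => ws.map (fun w => w.getD o 'ⓧ') ++ ['\n', '\r'] := by
      funext o
      simp only [Function.comp_apply, hcol o]
    rw [this]
    rw [List.flatMap_def]
    rfl
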